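-- pv_equiv track=rewrite | github.com/jthulhu/beans | beansast/lxrgmrparser.py | pos2coords
-- ===== SOURCE A (Python) =====
-- def pos2coords(pos, flux):
--     y = 1
--     x = 0
--     for char in flux[:pos]:
--         if char == '\n':
--             y += 1
--             x = 0
--         else:
--             x += 1
--     return x, y
-- ===== SOURCE B (Python) =====
-- def pos2coords(pos, flux):
--     prefix = flux[:pos]
--     y = prefix.count('\n') + 1
--     x = len(prefix) - (prefix.rfind('\n') + 1)
--     return x, y
-- ===== Notes on version B (the rewrite author's own statement) =====
-- stated objective: idiomatic
-- what changed: Replaces the explicit character-by-character (x,y) state machine with a slice-once formulation: y from prefix.count('\n')+1 and x as the distance past prefix.rfind('\n').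
import Mathlib
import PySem

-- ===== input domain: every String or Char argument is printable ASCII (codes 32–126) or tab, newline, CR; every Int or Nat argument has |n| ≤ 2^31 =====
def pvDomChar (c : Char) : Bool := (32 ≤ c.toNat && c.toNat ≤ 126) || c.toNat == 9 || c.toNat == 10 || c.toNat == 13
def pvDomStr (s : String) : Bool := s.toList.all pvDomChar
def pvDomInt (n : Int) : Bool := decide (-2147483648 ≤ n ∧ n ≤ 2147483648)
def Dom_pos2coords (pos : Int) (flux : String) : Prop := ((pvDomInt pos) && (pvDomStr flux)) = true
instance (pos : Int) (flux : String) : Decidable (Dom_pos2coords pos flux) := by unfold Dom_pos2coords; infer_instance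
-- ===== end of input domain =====

-- B slices the prefix once and derives (x, y) from count/rfind instead of A's per-character state machine; same values, idiomatic decomposition.

-- ===== PORT A =====
-- for char in flux[:pos]: update (x, y); return (x, y)
def pos2coords (pos : Int) (flux : String) : Int × Int :=
  let st := (PySem.Chars.slice flux.toList none (some pos)).foldl
    (fun (st : Int × Int) c => if c = '\n' then (0, st.2 + 1) else (st.1 + 1, st.2))
    (0, 1)
  (st.1, st.2)

-- ===== PORT B =====
-- pre = flux[:pos]; y = pre.count('\n') + 1; x = len(pre) - (pre.rfind('\n') + 1)
def pos2coords_alt (pos : Int) (flux : String) : Int × Int :=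
  let pre := PySem.Chars.slice flux.toList none (some pos)
  let y : Int := (PySem.Chars.count pre ['\n'] : Int) + 1
  let x : Int := (PySem.Chars.len pre : Int) - (PySem.Chars.rfind pre ['\n'] + 1)
  (x, y)

-- ===== PRECONDITION & SPEC =====
def Spec_pos2coords (pos : Int) (flux : String) (out : Int × Int) : Prop := out = pos2coords_alt pos flux
instance (pos : Int) (flux : String) (out : Int × Int) : Decidable (Spec_pos2coords pos flux out) := by unfold Spec_pos2coords; infer_instance

-- ===== CLAIM (what is proved, stated in full; the proofs are below) =====
def Claim_equal_pos2coords : Prop := ∀ (pos : Int) (flux : String), Dom_pos2coords pos flux → Spec_pos2coords pos flux (pos2coords pos flux)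

-- ===== LEMMAS AND PROOFS =====

-- a one-character needle is a prefix of a cons exactly when it is the head
theorem isPrefixOf_single_cons (d h : Char) (t : List Char) :
    [d].isPrefixOf (h :: t) = (d == h) := by
  simp [List.isPrefixOf]

theorem isPrefixOf_single_nil (d : Char) : [d].isPrefixOf ([] : List Char) = false := by
  simp [List.isPrefixOf]

-- count.go with enough fuel counts the character occurrences
theorem count_go_single (c : Char) (l : List Char) (acc fuel : Nat) (hf : l.length ≤ fuel) :
    PySem.Chars.count.go [c] fuel l acc = acc + l.count c := by
  induction l generalizing fuel acc with
  | nil => cases fuel <;> simp [PySem.Chars.count.go]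
  | cons h t ih =>
    cases fuel with
    | zero => simp at hf
    | succ f =>
      rw [PySem.Chars.count.go.eq_def]
      simp only [List.length_cons] at hf
      simp only [isPrefixOf_single_cons, List.length_cons, List.length_nil]
      have hdt : List.drop (0 + 1) (h :: t) = t := rfl
      by_cases hc : c = h
      · rw [if_pos (by simp [hc]), hdt, ih (acc + 1) f (by omega)]
        simp [hc]
        omega
      · have hhc : ¬ h = c := fun h' => hc h'.symm
        rw [if_neg (by simp [hc]), ih acc f (by omega)]
        simp [hhc]

-- Chars.count with a one-character needle is List.count
theorem count_single (c : Char) (s : List Char) :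
    PySem.Chars.count s [c] = s.count c := by
  rw [PySem.Chars.count]
  simp only [List.isEmpty_cons, Bool.false_eq_true, if_false]
  simpa using count_go_single c s 0 s.length le_rfl

theorem rfind_nil_single (d : Char) : PySem.Chars.rfind [] [d] = -1 := by
  rw [PySem.Chars.rfind, PySem.Chars.rfind.go.eq_def]
  simp

-- rfind.go ignores a snoc-ed last element at indices below the original length
theorem rfind_go_append (cs : List Char) (c d : Char) :
    ∀ i, i < cs.length → PySem.Chars.rfind.go (cs ++ [c]) [d] i = PySem.Chars.rfind.go cs [d] i := by
  intro i
  induction i with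
  | zero =>
    intro h0
    rw [PySem.Chars.rfind.go.eq_def, PySem.Chars.rfind.go.eq_def]
    cases cs with
    | nil => simp at h0
    | cons h t => simp [isPrefixOf_single_cons]
  | succ j ih =>
    intro hj
    rw [PySem.Chars.rfind.go.eq_def, PySem.Chars.rfind.go.eq_def]
    have hdrop : List.drop (j + 1) (cs ++ [c]) = List.drop (j + 1) cs ++ [c] :=
      List.drop_append_of_le_length (by omega)
    simp only [hdrop]
    have hne : List.drop (j + 1) cs ≠ [] := by
      intro hnil
      have := List.drop_eq_nil_iff.mp hnil
      omega
    obtain ⟨h, t, hht⟩ := List.exists_cons_of_ne_nil hne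
    rw [hht]
    simp only [List.cons_append, isPrefixOf_single_cons]
    by_cases hd : d = h
    · simp [hd]
    · have hb : (d == h) = false := by simp [hd]
      simp only [hb, Bool.false_eq_true, if_false]
      exact ih (by omega)

-- rfind on a snoc: the last element wins, else it is rfind of the front
theorem rfind_append_single (cs : List Char) (c d : Char) :
    PySem.Chars.rfind (cs ++ [c]) [d] =
      if c = d then (cs.length : Int) else PySem.Chars.rfind cs [d] := by
  rw [PySem.Chars.rfind]
  rw [List.length_append, List.length_cons, List.length_nil, Nat.zero_add]
  rw [PySem.Chars.rfind.go.eq_def]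
  have hd1 : List.drop (cs.length + 1) (cs ++ [c]) = [] := by
    apply List.drop_eq_nil_iff.mpr; simp
  simp only [hd1, isPrefixOf_single_nil, Bool.false_eq_true, if_false]
  -- now at index cs.length : drop cs.length (cs ++ [c]) = [c]
  cases cs with
  | nil =>
    rw [PySem.Chars.rfind.go.eq_def]
    show (if [d].isPrefixOf (([] : List Char) ++ [c]) = true then (0 : Int) else -1) = _
    simp only [List.nil_append, isPrefixOf_single_cons, List.length_nil, rfind_nil_single]
    by_cases hc : d = c
    · rw [if_pos (by simp [hc]), if_pos hc.symm]
      simp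
    · rw [if_neg (by simp [hc]), if_neg (fun h => hc h.symm)]
  | cons h t =>
    rw [PySem.Chars.rfind.go.eq_def]
    have hdrop : List.drop (t.length + 1) ((h :: t) ++ [c]) = [c] := by
      have : (h :: t).length = t.length + 1 := rfl
      rw [← this, List.drop_append_of_le_length le_rfl, List.drop_length]
      rfl
    show (if [d].isPrefixOf (List.drop (t.length + 1) ((h :: t) ++ [c])) = true
          then ((t.length : Int) + 1)
          else PySem.Chars.rfind.go ((h :: t) ++ [c]) [d] t.length) = _
    rw [hdrop]
    simp only [isPrefixOf_single_cons, List.length_cons]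
    by_cases hc : d = c
    · rw [if_pos (by simp [hc]), if_pos hc.symm]
      push_cast; ring
    · rw [if_neg (by simp [hc]), if_neg (fun h => hc h.symm)]
      rw [rfind_go_append (h :: t) c d t.length (by simp)]
      conv_rhs => rw [PySem.Chars.rfind, PySem.Chars.rfind.go.eq_def]
      show _ = (if [d].isPrefixOf (List.drop (t.length + 1) (h :: t)) = true
                then ((t.length : Int) + 1)
                else PySem.Chars.rfind.go (h :: t) [d] t.length)
      have hnil : List.drop (t.length + 1) (h :: t) = [] := by
        simp
      rw [hnil, if_neg (by simp)]

-- the heart: A's fold over any char list equals B's count/rfind formula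
theorem fold_eq_formula (cs : List Char) :
    cs.foldl (fun (st : Int × Int) c => if c = '\n' then (0, st.2 + 1) else (st.1 + 1, st.2)) (0, 1)
      = ((cs.length : Int) - (PySem.Chars.rfind cs ['\n'] + 1),
         (PySem.Chars.count cs ['\n'] : Int) + 1) := by
  induction cs using List.reverseRecOn with
  | nil =>
    simp [rfind_nil_single, count_single]
  | append_singleton cs c ih =>
    rw [List.foldl_append, ih, rfind_append_single, count_single, count_single]
    simp only [List.foldl_cons, List.foldl_nil]
    by_cases hc : c = '\n'
    · subst hc
      simp [List.count_append]
    · have hcn : ¬ ('\n' = c) := fun h => hc h.symm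
      simp [hc, List.count_append]
      ring

-- ===== VERDICT (by name: the statement is the Claim_ definition above) =====
theorem pos2coords_spec : Claim_equal_pos2coords := by
  intro pos flux _
  unfold Spec_pos2coords pos2coords pos2coords_alt
  simp only []
  rw [fold_eq_formula]
  simp [PySem.Chars.len]
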